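-- pv_equiv track=rewrite | github.com/KoYeJoon/coding_test_python | Programmers/level2/210613_77885.py | solution
-- ===== SOURCE A (Python) =====
-- def solution(numbers):
--     answer = []
--     for num in numbers :
--         if num%2 == 0 or (num//2)%2 == 0:
--             answer.append(num+1)
--         else :
--             cnt = 0
--             temp = num
--             while temp >0 :
--                 if temp%2 == 0 :
--                     answer.append(num+2**(cnt-1))
--                     break
--                 if temp==1 :
--                     answer.append(num+2**cnt)
--                 temp = (temp//2)
--                 cnt += 1
--     return answer
-- ===== SOURCE B (Python) =====
-- def solution(numbers):
--     # closed form: for odd num, num ^ (num+1) masks the trailing-ones block plus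
--     # the lowest zero bit, so ((num ^ (num+1)) + 1) // 4 == 2**(k-1) where k is
--     # the number of trailing one bits; even num just gains its lowest bit.
--     return [num + ((num ^ (num + 1)) + 1) // 4 if num % 2 else num + 1
--             for num in numbers]
-- ===== Notes on version B (the rewrite author's own statement) =====
-- stated objective: simpler
-- what changed: A walks each odd number's bits in an inner while loop to find the lowest zero bit; B replaces that per-number loop with the closed-form bit trick num + ((num ^ (num+1)) + 1) // 4 inside a single list comprehension.
-- outside the precondition, e.g. on solution([-1]): A returns [], B returns [-1]; on solution([-5]): A returns [], B returns [-3]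
import Mathlib
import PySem

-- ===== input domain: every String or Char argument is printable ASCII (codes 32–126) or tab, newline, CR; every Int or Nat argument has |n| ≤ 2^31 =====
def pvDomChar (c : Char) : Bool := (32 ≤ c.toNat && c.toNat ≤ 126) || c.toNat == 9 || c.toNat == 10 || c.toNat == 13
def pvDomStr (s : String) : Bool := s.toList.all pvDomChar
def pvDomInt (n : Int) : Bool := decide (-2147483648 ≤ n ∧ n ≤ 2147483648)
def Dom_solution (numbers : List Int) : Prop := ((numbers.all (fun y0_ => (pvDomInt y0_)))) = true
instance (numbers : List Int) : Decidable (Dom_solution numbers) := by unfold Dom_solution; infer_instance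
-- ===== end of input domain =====

-- B replaces A's per-number bit-walking while loop by a closed-form bit trick
-- (num ^ (num+1) isolates the trailing-ones block), one map over the list; objective: simpler.


-- ===== PORT A =====
-- the inner 'while temp > 0' loop of A; cnt ≥ 1 whenever the break branch fires
-- on A's actual calls (num odd), so the Nat subtraction cnt - 1 is exact there
def aLoop (num temp : Int) (cnt : Nat) (answer : List Int) : List Int :=
  if _h : 0 < temp then
    if PySem.Int.mod temp 2 = 0 then answer ++ [num + 2 ^ (cnt - 1)]
    else
      aLoop num (PySem.Int.floordiv temp 2) (cnt + 1)
        (if temp = 1 then answer ++ [num + 2 ^ cnt] else answer)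
  else answer
termination_by temp.toNat
decreasing_by
  rw [PySem.Int.floordiv_eq_ediv_of_pos (by omega)]
  omega

def solution (numbers : List Int) : List Int :=
  numbers.foldl
    (fun answer num =>
      if PySem.Int.mod num 2 = 0 ∨ PySem.Int.mod (PySem.Int.floordiv num 2) 2 = 0 then
        answer ++ [num + 1]
      else aLoop num num 0 answer)
    []

-- ===== PORT B =====
def solution_alt (numbers : List Int) : List Int :=
  numbers.map (fun num =>
    if PySem.Int.mod num 2 ≠ 0 then
      -- Python '... >> 2' written as '// 4' in Source B; exact for every int
      num + PySem.Int.floordiv (PySem.Int.bxor num (num + 1) + 1) 4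
    else num + 1)

-- ===== PRECONDITION & SPEC =====
-- Pre_ excludes lists with a negative element ≡ 3 (mod 4) — outside the problem's
-- intended positive domain: for such an element A's inner while loop (guarded by
-- temp > 0) never runs and no value is appended, so A returns a SHORTER list; a
-- per-element B cannot match that without copying A's element-dropping guard.
def Pre_solution (numbers : List Int) : Prop :=
  ∀ num ∈ numbers, ¬(num < 0 ∧ PySem.Int.mod num 4 = 3)
instance (numbers : List Int) : Decidable (Pre_solution numbers) := by
  unfold Pre_solution; infer_instance

def pvWitness_solution : List Int := ([2, 3, 7, -4, -3])

def Spec_solution (numbers : List Int) (out : List Int) : Prop := out = solution_alt numbers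
instance (numbers : List Int) (out : List Int) : Decidable (Spec_solution numbers out) := by unfold Spec_solution; infer_instance

-- ===== CLAIM (what is proved, stated in full; the proofs are below) =====
def Claim_equal_solution : Prop := ∀ (numbers : List Int), Dom_solution numbers → Pre_solution numbers → Spec_solution numbers (solution numbers)

-- ===== LEMMAS AND PROOFS =====

-- trailing-ones count of a natural number
def trailOnes (n : Nat) : Nat :=
  if n % 2 = 1 then trailOnes (n / 2) + 1 else 0
decreasing_by omega

theorem xor_div_two (m n : ℕ) : (m ^^^ n) / 2 = m / 2 ^^^ n / 2 := by
  apply Nat.eq_of_testBit_eq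
  intro i
  simp [Nat.testBit_div_two, Nat.testBit_xor]

theorem xor_two_mul_add_one (a b : ℕ) : (2 * a) ^^^ (2 * b + 1) = 2 * (a ^^^ b) + 1 := by
  have hm : ((2 * a) ^^^ (2 * b + 1)) % 2 = 1 := by rw [Nat.xor_mod_two_eq]; omega
  have hd : ((2 * a) ^^^ (2 * b + 1)) / 2 = a ^^^ b := by
    rw [xor_div_two]; congr 1 <;> omega
  omega

theorem xor_two_mul_add_one' (a b : ℕ) : (2 * a + 1) ^^^ (2 * b) = 2 * (a ^^^ b) + 1 := by
  rw [Nat.xor_comm, xor_two_mul_add_one, Nat.xor_comm]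

theorem trailOnes_even {n : ℕ} (h : n % 2 = 0) : trailOnes n = 0 := by
  rw [trailOnes, if_neg (by omega)]

theorem trailOnes_odd {n : ℕ} (h : n % 2 = 1) : trailOnes n = trailOnes (n / 2) + 1 := by
  rw [trailOnes, if_pos h]

theorem xor_succ (n : ℕ) : n ^^^ (n + 1) = 2 ^ (trailOnes n + 1) - 1 := by
  induction n using Nat.strong_induction_on with
  | _ n ih =>
    rcases Nat.even_or_odd n with ⟨a, ha⟩ | ⟨a, ha⟩
    · subst ha
      rw [show a + a = 2 * a by ring, xor_two_mul_add_one, Nat.xor_self]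
      rw [trailOnes_even (by omega)]
      norm_num
    · subst ha
      have h2 : 2 * a + 1 + 1 = 2 * (a + 1) := by ring
      rw [h2, xor_two_mul_add_one', ih a (by omega)]
      rw [trailOnes_odd (show (2 * a + 1) % 2 = 1 by omega)]
      rw [show (2 * a + 1) / 2 = a by omega]
      have hp : 1 ≤ 2 ^ (trailOnes a + 1) := Nat.one_le_two_pow
      rw [pow_succ 2 (trailOnes a + 1)]
      omega

theorem trailOnes_ge_two {n : ℕ} (h : n % 4 = 3) : 2 ≤ trailOnes n := by
  rw [trailOnes_odd (by omega), trailOnes_odd (show n / 2 % 2 = 1 by omega)]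
  omega

-- A's inner loop appends exactly one element: num + 2^(cnt + trailOnes t - 1)
theorem aLoop_spec (t : ℕ) (ht : 0 < t) (num : Int) (cnt : Nat) (answer : List Int) :
    aLoop num (t : Int) cnt answer = answer ++ [num + 2 ^ (cnt + trailOnes t - 1)] := by
  induction t using Nat.strong_induction_on generalizing cnt answer with
  | _ t ih =>
    rw [aLoop]
    rw [dif_pos (by exact_mod_cast ht)]
    by_cases he : t % 2 = 1
    · rw [if_neg (by simp; omega)]
      have hfd : PySem.Int.floordiv (t : Int) 2 = ((t / 2 : ℕ) : Int) := by
        exact_mod_cast PySem.Int.floordiv_natCast t 2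
      rw [hfd]
      by_cases h1 : t = 1
      · subst h1
        rw [if_pos (by norm_num)]
        rw [aLoop]
        rw [dif_neg (by norm_num)]
        rw [trailOnes_odd (by omega), trailOnes_even (by omega)]
        simp
      · rw [if_neg (by exact_mod_cast fun h => h1 (by exact_mod_cast h))]
        rw [ih (t / 2) (by omega) (by omega) (cnt + 1) answer]
        congr 3
        rw [trailOnes_odd he]
        congr 1
        omega
    · rw [if_pos (by simp; omega)]
      rw [trailOnes_even (by omega)]
      norm_num

-- the per-element value B computes
theorem bxor_mod_four_one (num : Int) (h : PySem.Int.mod num 4 = 1) :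
    PySem.Int.bxor num (num + 1) = 3 := by
  rw [PySem.Int.mod_eq_emod_of_pos (by norm_num)] at h
  rcases le_or_gt 0 num with hn | hn
  · obtain ⟨m, hm⟩ : ∃ m : ℕ, num = (4 * m + 1 : ℕ) := ⟨(num / 4).toNat, by omega⟩
    subst hm
    have : ((4 * m + 1 : ℕ) : Int) + 1 = ((4 * m + 2 : ℕ) : Int) := by push_cast; ring
    rw [this, PySem.Int.bxor_natCast]
    have h1 : 4 * m + 1 = 2 * (2 * m) + 1 := by ring
    have h2 : 4 * m + 2 = 2 * (2 * m + 1) := by ring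
    rw [h1, h2, xor_two_mul_add_one', xor_two_mul_add_one, Nat.xor_self]
    norm_num
  · -- num ≤ -3: both num and num+1 negative; Python xor via complements
    have h3 : num ≤ -3 := by omega
    unfold PySem.Int.bxor
    rw [if_neg (by omega), if_neg (by omega)]
    obtain ⟨m, hm1, hm2⟩ : ∃ m : ℕ, (-num - 1).toNat = 4 * m + 2 ∧ (-(num + 1) - 1).toNat = 4 * m + 1 :=
      ⟨((-num - 2) / 4).toNat, by omega, by omega⟩
    rw [hm1, hm2]
    have h1 : 4 * m + 2 = 2 * (2 * m + 1) := by ring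
    have h2 : 4 * m + 1 = 2 * (2 * m) + 1 := by ring
    rw [h1, h2, xor_two_mul_add_one, xor_two_mul_add_one', Nat.xor_self]
    norm_num

-- per-element agreement: A's step appends exactly B's element (under Pre_)
theorem step_eq (answer : List Int) (num : Int) (hpre : ¬(num < 0 ∧ PySem.Int.mod num 4 = 3)) :
    (if PySem.Int.mod num 2 = 0 ∨ PySem.Int.mod (PySem.Int.floordiv num 2) 2 = 0 then
        answer ++ [num + 1]
      else aLoop num num 0 answer)
    = answer ++ [if PySem.Int.mod num 2 ≠ 0 then
        num + PySem.Int.floordiv (PySem.Int.bxor num (num + 1) + 1) 4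
      else num + 1] := by
  have e2 : PySem.Int.mod num 2 = num % 2 := PySem.Int.mod_eq_emod_of_pos (by norm_num)
  have e4 : PySem.Int.mod num 4 = num % 4 := PySem.Int.mod_eq_emod_of_pos (by norm_num)
  have ed : PySem.Int.floordiv num 2 = num / 2 := PySem.Int.floordiv_eq_ediv_of_pos (by norm_num)
  have ed2 : PySem.Int.mod (num / 2) 2 = (num / 2) % 2 := PySem.Int.mod_eq_emod_of_pos (by norm_num)
  by_cases hodd : num % 2 = 0
  · rw [if_pos (by rw [e2]; exact Or.inl hodd), if_neg (by rw [e2]; simpa using hodd)]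
  · by_cases h4 : num % 4 = 3
    · -- trailing-ones case: A walks the bits, B uses the closed form
      have hn : 0 ≤ num := by rw [e4] at hpre; omega
      obtain ⟨n, hn⟩ : ∃ n : ℕ, num = (n : Int) := ⟨num.toNat, by omega⟩
      subst hn
      have hn4 : n % 4 = 3 := by omega
      rw [if_neg (by rw [e2, ed, ed2]; omega), if_pos (by rw [e2]; omega)]
      rw [aLoop_spec n (by omega)]
      have : ((n : ℕ) : Int) + 1 = ((n + 1 : ℕ) : Int) := by push_cast; ring
      rw [this, PySem.Int.bxor_natCast, xor_succ n]
      have hto : 2 ≤ trailOnes n := trailOnes_ge_two hn4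
      have hpow : ((2 ^ (trailOnes n + 1) - 1 : ℕ) : Int) + 1 = ((2 ^ (trailOnes n + 1) : ℕ) : Int) := by
        have : 1 ≤ 2 ^ (trailOnes n + 1) := Nat.one_le_two_pow
        push_cast [this]; ring
      rw [hpow]
      have hfd : PySem.Int.floordiv ((2 ^ (trailOnes n + 1) : ℕ) : Int) 4 =
          ((2 ^ (trailOnes n + 1) / 4 : ℕ) : Int) := by
        exact_mod_cast PySem.Int.floordiv_natCast (2 ^ (trailOnes n + 1)) 4
      rw [hfd]
      congr 2
      have hdiv : 2 ^ (trailOnes n + 1) / 4 = 2 ^ (trailOnes n - 1) := by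
        have : trailOnes n + 1 = (trailOnes n - 1) + 2 := by omega
        rw [this, pow_add]
        norm_num
      rw [hdiv]
      have : 0 + trailOnes n - 1 = trailOnes n - 1 := by omega
      rw [this]
      push_cast
      ring
    · -- num ≡ 1 (mod 4): both sides give num + 1
      have h1 : num % 4 = 1 := by omega
      rw [if_pos (by rw [e2, ed, ed2]; right; omega), if_pos (by rw [e2]; omega)]
      rw [bxor_mod_four_one num (by rw [e4]; omega)]
      norm_num [show PySem.Int.floordiv 4 4 = 1 from rfl]

theorem fold_eq (l : List Int) (acc : List Int) (hpre : ∀ num ∈ l, ¬(num < 0 ∧ PySem.Int.mod num 4 = 3)) :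
    l.foldl
      (fun answer num =>
        if PySem.Int.mod num 2 = 0 ∨ PySem.Int.mod (PySem.Int.floordiv num 2) 2 = 0 then
          answer ++ [num + 1]
        else aLoop num num 0 answer) acc
    = acc ++ l.map (fun num =>
        if PySem.Int.mod num 2 ≠ 0 then
          num + PySem.Int.floordiv (PySem.Int.bxor num (num + 1) + 1) 4
        else num + 1) := by
  induction l generalizing acc with
  | nil => simp
  | cons x xs ih =>
    simp only [List.foldl_cons, List.map_cons]
    rw [step_eq acc x (hpre x (by simp))]
    rw [ih _ (fun num hm => hpre num (by simp [hm]))]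
    simp

-- ===== VERDICT (by name: the statement is the Claim_ definition above) =====
theorem solution_spec : Claim_equal_solution := by
  intro numbers _hdom hpre
  unfold Spec_solution solution solution_alt
  rw [fold_eq numbers [] hpre]
  simp
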